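-- pv_equiv track=rewrite | github.com/sunidhisharma03/AlgorithmAndComplexity | lab3/NP Complete/Hamiltonian.py | hamiltonian_cycle_dynamic
-- ===== SOURCE A (Python) =====
-- def hamiltonian_cycle_dynamic(graph):
--     n = len(graph)
--     INF = float('inf')
--
--     # DP table: dp[mask][i] = min cost to visit set "mask" ending at vertex i
--     dp = [[INF] * n for _ in range(1 << n)]
--     dp[1][0] = 0  # Start from vertex 0
--
--     # Iterate over all subsets
--     for mask in range(1, 1 << n):
--         for i in range(n):
--             if (mask & (1 << i)) == 0:
--                 continue
--             prev_mask = mask ^ (1 << i)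
--             for j in range(n):
--                 if prev_mask & (1 << j) and graph[j][i]:
--                     dp[mask][i] = min(dp[mask][i], dp[prev_mask][j] + 1)
--
--     # Find minimum cost cycle
--     min_cycle = INF
--     for i in range(1, n):
--         if graph[i][0]:  # Must connect last node to start node
--             min_cycle = min(min_cycle, dp[(1 << n) - 1][i] + 1)
--
--     return min_cycle if min_cycle < INF else None
-- ===== SOURCE B (Python) =====
-- def hamiltonian_cycle_dynamic(graph):
--     n = len(graph)
--     memo = {}
--
--     def cost(mask, i):
--         # min number of edges of a path over vertex set `mask` from 0 to i, or None
--         if mask == 1: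
--             return 0 if i == 0 else None
--         key = mask * n + i
--         if key in memo:
--             return memo[key]
--         prev = mask ^ (1 << i)
--         best = None
--         for j in range(n):
--             if (prev >> j) & 1 and graph[j][i]:
--                 c = cost(prev, j)
--                 if c is not None and (best is None or c + 1 < best):
--                     best = c + 1
--         memo[key] = best
--         return best
--
--     full = (1 << n) - 1
--     ans = None
--     for i in range(1, n):
--         if graph[i][0]:
--             c = cost(full, i)
--             if c is not None and (ans is None or c + 1 < ans):
--                 ans = c + 1
--     return ans
-- ===== Notes on version B (the rewrite author's own statement) =====
-- stated objective: alternative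
-- what changed: Replaces A's bottom-up 2^n x n DP table (three nested loops over all masks) with a top-down memoized recursion cost(mask, i) over reachable states, using None instead of float('inf') as the absent value.
-- outside the precondition, e.g. on hamiltonian_cycle_dynamic([[0, 1], [1]]): A returns 2, B returns 2
import Mathlib
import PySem

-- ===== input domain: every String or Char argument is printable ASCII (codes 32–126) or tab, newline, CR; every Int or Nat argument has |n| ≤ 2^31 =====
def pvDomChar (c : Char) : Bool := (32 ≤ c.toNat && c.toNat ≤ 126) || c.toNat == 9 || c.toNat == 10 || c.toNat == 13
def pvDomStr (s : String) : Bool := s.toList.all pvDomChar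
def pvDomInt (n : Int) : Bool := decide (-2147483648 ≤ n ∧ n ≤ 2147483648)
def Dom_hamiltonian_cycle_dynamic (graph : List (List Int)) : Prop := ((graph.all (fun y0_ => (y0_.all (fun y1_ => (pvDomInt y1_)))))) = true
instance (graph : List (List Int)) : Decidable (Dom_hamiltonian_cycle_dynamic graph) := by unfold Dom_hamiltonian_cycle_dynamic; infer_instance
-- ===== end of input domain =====

-- B replaces A's bottom-up 2^n × n DP table by a top-down memoized recursion over reachable
-- states (objective: alternative decomposition, same asymptotic cost); equal return values on Pre_.

-- ===== PORT A =====
-- shared access helpers (both Pythons index graph the same way; exact on Pre_, where all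
-- indices are nonnegative and in range)
def pvEdge (graph : List (List Int)) (j i : Nat) : Bool :=
  (graph.getD j []).getD i 0 != 0

-- `none` plays float('inf'): min and +1 on the extended integers, exactly Python's
-- min(cur, v + 1) (min is left-biased) resp. B's "c is not None and (best is None or c+1 < best)"
def pvAddOne : Option Int → Option Int
  | none => none
  | some v => some (v + 1)

def pvMin : Option Int → Option Int → Option Int
  | none, b => b
  | some a, none => some a
  | some a, some b => if b < a then some b else some a

def pvDpGet (dp : List (List (Option Int))) (m i : Nat) : Option Int :=
  (dp.getD m []).getD i none

def pvDpSet (dp : List (List (Option Int))) (m i : Nat) (v : Option Int) : List (List (Option Int)) :=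
  dp.set m ((dp.getD m []).set i v)

def hamiltonian_cycle_dynamic (graph : List (List Int)) : Option Int :=
  let n := graph.length
  -- dp[mask][i], INF = none
  let dp0 : List (List (Option Int)) := List.replicate (2 ^ n) (List.replicate n none)
  -- dp[1][0] = 0 ; on the empty graph Python raises IndexError here (excluded by Pre_)
  let dp1 := pvDpSet dp0 1 0 (some 0)
  -- for mask in range(1, 1 << n): for i in range(n): …
  let dp := (List.range' 1 (2 ^ n - 1)).foldl (fun dp mask =>
    (List.range n).foldl (fun dp i =>
      if mask &&& (1 <<< i) == 0 then dp
      else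
        let prev := mask ^^^ (1 <<< i)
        let v := (List.range n).foldl (fun cur j =>
            if prev &&& (1 <<< j) != 0 && pvEdge graph j i then
              pvMin cur (pvAddOne (pvDpGet dp prev j))
            else cur)
          (pvDpGet dp mask i)
        pvDpSet dp mask i v) dp) dp1
  -- min_cycle loop; returning the option is "min_cycle if min_cycle < INF else None"
  (List.range' 1 (n - 1)).foldl (fun mc i =>
    if pvEdge graph i 0 then pvMin mc (pvAddOne (pvDpGet dp (2 ^ n - 1) i)) else mc) none

-- ===== PORT B =====
-- cost(mask, i) with the memo dict threaded through; the fuel argument only makes the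
-- recursion total in Lean (every actual call has i ∈ mask, so mask strictly decreases and
-- fuel = 2^n at the top is never exhausted)
def pvCost (graph : List (List Int)) (n : Nat) :
    Nat → PySem.Dict Nat (Option Int) → Nat → Nat →
    Option Int × PySem.Dict Nat (Option Int)
  | 0, memo, _, _ => (none, memo)
  | fuel + 1, memo, mask, i =>
    if mask == 1 then ((if i == 0 then some 0 else none), memo)
    else
      match memo.get? (mask * n + i) with
      | some v => (v, memo)
      | none =>
        let prev := mask ^^^ (1 <<< i)
        let r := (List.range n).foldl
          (fun (acc : Option Int × PySem.Dict Nat (Option Int)) j =>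
            if ((prev >>> j) &&& 1) == 1 && pvEdge graph j i then
              let rc := pvCost graph n fuel acc.2 prev j
              (pvMin acc.1 (pvAddOne rc.1), rc.2)
            else acc) (none, memo)
        (r.1, r.2.insert (mask * n + i) r.1)

def hamiltonian_cycle_dynamic_alt (graph : List (List Int)) : Option Int :=
  let n := graph.length
  let full := 2 ^ n - 1
  let r := (List.range' 1 (n - 1)).foldl
    (fun (acc : Option Int × PySem.Dict Nat (Option Int)) i =>
      if pvEdge graph i 0 then
        let rc := pvCost graph n (2 ^ n) acc.2 full i
        (pvMin acc.1 (pvAddOne rc.1), rc.2)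
      else acc) (none, PySem.Dict.empty)
  r.1

-- ===== PRECONDITION & SPEC =====
-- Pre_ excludes the empty graph, on which A raises IndexError (dp[1][0] on a 1-row table),
-- and ragged graphs with a row shorter than len(graph), on which graph[j][i] raises for most
-- shapes; on the few ragged shapes where only never-read diagonal entries are missing A still
-- returns, and B returns the same value there (slight narrowing, see claim cites).
def Pre_hamiltonian_cycle_dynamic (graph : List (List Int)) : Prop :=
  graph ≠ [] ∧ ∀ row ∈ graph, graph.length ≤ row.length
instance (graph : List (List Int)) : Decidable (Pre_hamiltonian_cycle_dynamic graph) := by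
  unfold Pre_hamiltonian_cycle_dynamic; infer_instance

def pvWitness_hamiltonian_cycle_dynamic : List (List Int) := [[0, 1], [1, 0]]

def Spec_hamiltonian_cycle_dynamic (graph : List (List Int)) (out : Option Int) : Prop :=
  out = hamiltonian_cycle_dynamic_alt graph
instance (graph : List (List Int)) (out : Option Int) :
    Decidable (Spec_hamiltonian_cycle_dynamic graph out) := by
  unfold Spec_hamiltonian_cycle_dynamic; infer_instance

-- ===== CLAIM (what is proved, stated in full; the proofs are below) =====
def Claim_equal_hamiltonian_cycle_dynamic : Prop :=
  ∀ (graph : List (List Int)), Dom_hamiltonian_cycle_dynamic graph →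
    Pre_hamiltonian_cycle_dynamic graph →
    Spec_hamiltonian_cycle_dynamic graph (hamiltonian_cycle_dynamic graph)

-- ===== LEMMAS AND PROOFS =====

-- the common specification: pvC graph n mask i is the value both programs compute for
-- state (mask, i); pvCs is its fuelled form (fuel ≥ mask suffices, see pvCs_fuel)
def pvCs (graph : List (List Int)) (n : Nat) : Nat → Nat → Nat → Option Int
  | 0, _, _ => none
  | fuel + 1, mask, i =>
    if mask = 1 then (if i = 0 then some 0 else none)
    else (List.range n).foldl (fun cur j =>
      if (mask ^^^ (1 <<< i)).testBit j && pvEdge graph j i then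
        pvMin cur (pvAddOne (pvCs graph n fuel (mask ^^^ (1 <<< i)) j))
      else cur) none

def pvC (graph : List (List Int)) (n mask i : Nat) : Option Int :=
  pvCs graph n mask mask i

-- bit-test bridges for the two ports' guards
theorem pvBitA (m j : Nat) : (m &&& (1 <<< j) != 0) = m.testBit j := by
  rw [Nat.shiftLeft_eq, Nat.one_mul, Nat.and_two_pow]
  cases h : m.testBit j <;> simp

theorem pvBitB (m j : Nat) : ((((m >>> j) &&& 1) == 1) : Bool) = m.testBit j := by
  simp only [Nat.and_one_is_mod, Nat.testBit, Nat.one_and_eq_mod_two, Nat.mod_two_bne_zero]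

theorem pvXorLt {m i : Nat} (h : m.testBit i = true) : m ^^^ (1 <<< i) < m := by
  rw [Nat.shiftLeft_eq, Nat.one_mul]
  apply Nat.lt_of_testBit i
  · simp [Nat.testBit_xor, h]
  · exact h
  · intro j hj
    simp [Nat.testBit_xor, (Nat.ne_of_gt hj).symm]

theorem pvTestBit_pos {m i : Nat} (h : m.testBit i = true) : 1 ≤ m := by
  rcases Nat.eq_zero_or_pos m with h0 | h1
  · subst h0; simp [Nat.zero_testBit] at h
  · exact h1

-- fuel irrelevance of the spec
theorem pvCs_fuel (graph : List (List Int)) (n : Nat) :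
    ∀ mask fuel i, mask ≤ fuel → mask.testBit i = true →
      pvCs graph n fuel mask i = pvC graph n mask i := by
  intro mask
  induction mask using Nat.strong_induction_on with
  | _ mask IH =>
    intro fuel i hle hbit
    have h1 : 1 ≤ mask := pvTestBit_pos hbit
    obtain ⟨f, rfl⟩ : ∃ f, fuel = f + 1 := ⟨fuel - 1, by omega⟩
    obtain ⟨m, rfl⟩ : ∃ m, mask = m + 1 := ⟨mask - 1, by omega⟩
    by_cases hm : m + 1 = 1
    · simp [pvC, pvCs, hm]
    · have hprev : (m + 1) ^^^ (1 <<< i) < m + 1 := pvXorLt hbit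
      show pvCs graph n (f + 1) (m + 1) i = pvCs graph n (m + 1) (m + 1) i
      simp only [pvCs, hm, if_false]
      apply PySem.List.foldl_congr_mem
      intro acc j _
      by_cases hg : (((m + 1) ^^^ (1 <<< i)).testBit j && pvEdge graph j i) = true
      · have hbj : ((m + 1) ^^^ (1 <<< i)).testBit j = true := by
          exact (Bool.and_eq_true_iff.mp hg).1
        rw [if_pos hg, if_pos hg,
          IH _ hprev f j (by omega) hbj, IH _ hprev m j (by omega) hbj]
      · rw [if_neg hg, if_neg hg]

theorem pvBitA0 (m j : Nat) : ((m &&& (1 <<< j) == 0) : Bool) = !m.testBit j := by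
  rw [← pvBitA]
  cases h : (m &&& (1 <<< j) : Nat) == 0 <;> simp_all

theorem pvC_eq_fold (graph : List (List Int)) (n : Nat) {mask i : Nat}
    (hm : mask ≠ 1) (hbit : mask.testBit i = true) :
    pvC graph n mask i = (List.range n).foldl (fun cur j =>
      if (mask ^^^ (1 <<< i)).testBit j && pvEdge graph j i then
        pvMin cur (pvAddOne (pvC graph n (mask ^^^ (1 <<< i)) j))
      else cur) none := by
  have h1 : 1 ≤ mask := pvTestBit_pos hbit
  have hprev : mask ^^^ (1 <<< i) < mask := pvXorLt hbit
  obtain ⟨m, rfl⟩ : ∃ m, mask = m + 1 := ⟨mask - 1, by omega⟩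
  show pvCs graph n (m + 1) (m + 1) i = _
  simp only [pvCs, hm, if_false]
  apply PySem.List.foldl_congr_mem
  intro acc j _
  by_cases hg : (((m + 1) ^^^ (1 <<< i)).testBit j && pvEdge graph j i) = true
  · rw [if_pos hg, if_pos hg, pvCs_fuel graph n _ m j (by omega) (Bool.and_eq_true_iff.mp hg).1]
  · rw [if_neg hg, if_neg hg]

-- B side: the memo dict only ever holds correct values
-- flat memo key mask*n+i; only in-range keys are ever inserted or read
def pvInv (graph : List (List Int)) (n : Nat)
    (memo : PySem.Dict Nat (Option Int)) : Prop :=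
  ∀ mask i v, i < n → memo.get? (mask * n + i) = some v → v = pvC graph n mask i

theorem pvKeyInj {n mask i mask' i' : Nat} (hi : i < n) (hi' : i' < n)
    (h : mask' * n + i' = mask * n + i) : mask' = mask ∧ i' = i := by
  have hmod : i' = i := by
    have h1 := congrArg (· % n) h
    simpa [Nat.mul_add_mod', Nat.mod_eq_of_lt hi, Nat.mod_eq_of_lt hi'] using h1
  subst hmod
  have : mask' * n = mask * n := by omega
  have hn : 0 < n := by omega
  exact ⟨Nat.eq_of_mul_eq_mul_right hn this, rfl⟩

theorem pvCost_fold (graph : List (List Int)) (n f prev i : Nat)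
    (hrec : ∀ memo j, j < n → prev.testBit j = true → pvInv graph n memo →
      (pvCost graph n f memo prev j).1 = pvC graph n prev j ∧
      pvInv graph n (pvCost graph n f memo prev j).2) :
    ∀ (l : List Nat) (b : Option Int) memo, (∀ x ∈ l, x < n) → pvInv graph n memo →
      ((l.foldl (fun (acc : Option Int × PySem.Dict Nat (Option Int)) j =>
          if ((prev >>> j) &&& 1) == 1 && pvEdge graph j i then
            let rc := pvCost graph n f acc.2 prev j
            (pvMin acc.1 (pvAddOne rc.1), rc.2)
          else acc) (b, memo)).1
        = l.foldl (fun cur j =>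
            if prev.testBit j && pvEdge graph j i then
              pvMin cur (pvAddOne (pvC graph n prev j))
            else cur) b)
      ∧ pvInv graph n ((l.foldl (fun (acc : Option Int × PySem.Dict Nat (Option Int)) j =>
          if ((prev >>> j) &&& 1) == 1 && pvEdge graph j i then
            let rc := pvCost graph n f acc.2 prev j
            (pvMin acc.1 (pvAddOne rc.1), rc.2)
          else acc) (b, memo)).2) := by
  intro l
  induction l with
  | nil => intro b memo _ hinv; exact ⟨rfl, hinv⟩
  | cons x l IH =>
    intro b memo hbnd hinv
    have hbnd' := fun y hy => hbnd y (List.mem_cons_of_mem _ hy)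
    simp only [List.foldl_cons]
    by_cases hg : (((prev >>> x &&& 1 == 1) && pvEdge graph x i) : Bool) = true
    · have hg2 : (prev.testBit x && pvEdge graph x i) = true := by rwa [pvBitB] at hg
      have hbx : prev.testBit x = true := (Bool.and_eq_true_iff.mp hg2).1
      obtain ⟨h1, h2⟩ := hrec memo x (hbnd x List.mem_cons_self) hbx hinv
      rw [if_pos hg, if_pos hg2, h1]
      exact IH (pvMin b (pvAddOne (pvC graph n prev x))) (pvCost graph n f memo prev x).2 hbnd' h2
    · have hg2 : ¬((prev.testBit x && pvEdge graph x i) = true) := by rwa [pvBitB] at hg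
      rw [if_neg hg, if_neg hg2]
      exact IH b memo hbnd' hinv

theorem pvCost_ok (graph : List (List Int)) (n : Nat) :
    ∀ mask fuel memo i, i < n → mask ≤ fuel → mask.testBit i = true → pvInv graph n memo →
      (pvCost graph n fuel memo mask i).1 = pvC graph n mask i ∧
      pvInv graph n (pvCost graph n fuel memo mask i).2 := by
  intro mask
  induction mask using Nat.strong_induction_on with
  | _ mask IH =>
    intro fuel memo i hi hle hbit hinv
    have h1 : 1 ≤ mask := pvTestBit_pos hbit
    obtain ⟨f, rfl⟩ : ∃ f, fuel = f + 1 := ⟨fuel - 1, by omega⟩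
    by_cases hm : mask = 1
    · subst hm
      have hi0 : i = 0 := Nat.testBit_one_eq_true_iff_self_eq_zero.mp hbit
      subst hi0
      simp [pvCost, pvC, pvCs, hinv]
    · have hprev : mask ^^^ (1 <<< i) < mask := pvXorLt hbit
      have hmb : (mask == 1) = false := by simp [hm]
      cases hmg : memo.get? (mask * n + i) with
      | some v =>
        simp only [pvCost, hmb, Bool.false_eq_true, if_false, hmg]
        exact ⟨hinv mask i v hi hmg, hinv⟩
      | none =>
        have hrec : ∀ memo' j, j < n → (mask ^^^ (1 <<< i)).testBit j = true → pvInv graph n memo' →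
            (pvCost graph n f memo' (mask ^^^ (1 <<< i)) j).1 = pvC graph n (mask ^^^ (1 <<< i)) j ∧
            pvInv graph n (pvCost graph n f memo' (mask ^^^ (1 <<< i)) j).2 := by
          intro memo' j hj hbj hinv'
          exact IH _ hprev f memo' j hj (by omega) hbj hinv'
        obtain ⟨r1, r2⟩ := pvCost_fold graph n f (mask ^^^ (1 <<< i)) i hrec
          (List.range n) none memo (fun x hx => List.mem_range.mp hx) hinv
        simp only [pvCost, hmb, Bool.false_eq_true, if_false, hmg]
        rw [← pvC_eq_fold graph n hm hbit] at r1
        refine ⟨r1, ?_⟩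
        intro mask' i' v hi' hv
        rw [PySem.Dict.get?_insert] at hv
        by_cases he : mask' * n + i' = mask * n + i
        · rw [if_pos he] at hv
          obtain ⟨rfl, rfl⟩ := pvKeyInj hi hi' he
          injection hv with hv
          rw [← hv, r1]
        · rw [if_neg he] at hv
          exact r2 mask' i' v hi' hv

-- A side: characterisation of the DP table
def pvInit (mask i : Nat) : Option Int := if mask = 1 ∧ i = 0 then some 0 else none

def pvSpecDp (graph : List (List Int)) (n M mask i : Nat) : Option Int :=
  if mask ≤ M ∧ mask.testBit i = true then pvC graph n mask i else pvInit mask i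

def pvShape (dp : List (List (Option Int))) (n : Nat) : Prop :=
  dp.length = 2 ^ n ∧ ∀ m, m < 2 ^ n → (dp.getD m []).length = n

theorem pvDpGet_set (dp : List (List (Option Int))) (n : Nat) (hs : pvShape dp n)
    {m i : Nat} (hm : m < 2 ^ n) (hi : i < n) (v : Option Int) (m' i' : Nat) :
    pvDpGet (pvDpSet dp m i v) m' i' = if m' = m ∧ i' = i then v else pvDpGet dp m' i' := by
  obtain ⟨hl, hr⟩ := hs
  have hmlen : m < dp.length := by omega
  have hilen : i < (dp.getD m []).length := by rw [hr m hm]; exact hi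
  unfold pvDpGet pvDpSet
  simp only [List.getD_eq_getElem?_getD]
  by_cases hmm : m' = m
  · subst hmm
    rw [List.getElem?_set_self hmlen, Option.getD_some]
    by_cases hii : i' = i
    · subst hii
      rw [List.getD_eq_getElem?_getD] at hilen
      rw [List.getElem?_set_self hilen]
      simp
    · rw [List.getElem?_set_ne (Ne.symm hii)]
      simp [hii]
  · rw [List.getElem?_set_ne (Ne.symm hmm)]
    simp [hmm]

theorem pvShape_set (dp : List (List (Option Int))) (n : Nat) (hs : pvShape dp n)
    {m i : Nat} (hm : m < 2 ^ n) (v : Option Int) :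
    pvShape (pvDpSet dp m i v) n := by
  obtain ⟨hl, hr⟩ := hs
  refine ⟨by rw [pvDpSet, List.length_set, hl], ?_⟩
  intro k hk
  unfold pvDpSet
  simp only [List.getD_eq_getElem?_getD]
  by_cases hkm : k = m
  · subst hkm
    rw [List.getElem?_set_self (by omega), Option.getD_some, List.length_set]
    have := hr k hk
    rwa [List.getD_eq_getElem?_getD] at this
  · rw [List.getElem?_set_ne (Ne.symm hkm)]
    have := hr k hk
    rwa [List.getD_eq_getElem?_getD] at this

theorem pvShape_dp0 (n : Nat) :
    pvShape (List.replicate (2 ^ n) (List.replicate n (none : Option Int))) n := by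
  refine ⟨List.length_replicate, ?_⟩
  intro m hm
  rw [List.getD_eq_getElem?_getD, List.getElem?_replicate_of_lt hm, Option.getD_some]
  exact List.length_replicate

theorem pvShape_dp1 (n : Nat) (hn : 1 ≤ n) :
    pvShape (pvDpSet (List.replicate (2 ^ n) (List.replicate n (none : Option Int))) 1 0 (some 0)) n := by
  have h2 : 1 < 2 ^ n := by
    calc 1 < 2 ^ 1 := by norm_num
    _ ≤ 2 ^ n := Nat.pow_le_pow_right (by norm_num) hn
  exact pvShape_set _ n (pvShape_dp0 n) h2 (some 0)

theorem pvDpGet_dp1 (graph : List (List Int)) (n : Nat) (hn : 1 ≤ n) (m i : Nat)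
    (hm : m < 2 ^ n) (hi : i < n) :
    pvDpGet (pvDpSet (List.replicate (2 ^ n) (List.replicate n (none : Option Int))) 1 0 (some 0)) m i
      = pvSpecDp graph n 0 m i := by
  have h2 : 1 < 2 ^ n := by
    calc 1 < 2 ^ 1 := by norm_num
    _ ≤ 2 ^ n := Nat.pow_le_pow_right (by norm_num) hn
  rw [pvDpGet_set _ n (pvShape_dp0 n) h2 hn (some 0) m i]
  have hbase : pvDpGet (List.replicate (2 ^ n) (List.replicate n (none : Option Int))) m i = none := by
    simp only [pvDpGet, List.getD_eq_getElem?_getD]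
    rw [List.getElem?_replicate_of_lt hm, Option.getD_some,
      List.getElem?_replicate_of_lt hi, Option.getD_some]
  have hM0 : ¬(m ≤ 0 ∧ m.testBit i = true) := by
    rintro ⟨h0, hb⟩
    have := pvTestBit_pos hb
    omega
  unfold pvSpecDp pvInit
  rw [if_neg hM0]
  by_cases hmi : m = 1 ∧ i = 0
  · simp [hmi]
  · rw [if_neg hmi, hbase, if_neg hmi]


-- the inner loop over i at a fixed mask M+1 updates exactly row M+1 to its final value
theorem pvInner (graph : List (List Int)) (n : Nat) (M : Nat) (hM : M + 1 < 2 ^ n) :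
    ∀ (l : List Nat) (done : Nat → Bool) (dp : List (List (Option Int))),
      (∀ x ∈ l, x < n) → l.Nodup → (∀ x ∈ l, done x = false) →
      pvShape dp n →
      (∀ m i, m < 2 ^ n → i < n → pvDpGet dp m i =
        if m = M + 1 ∧ done i = true then pvSpecDp graph n (M + 1) m i
        else pvSpecDp graph n M m i) →
      pvShape (l.foldl (fun dp i =>
        if ((M + 1) &&& (1 <<< i) == 0) = true then dp
        else
          pvDpSet dp (M + 1) i ((List.range n).foldl (fun cur j =>
            if ((((M + 1) ^^^ (1 <<< i)) &&& (1 <<< j) != 0) && pvEdge graph j i) = true then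
              pvMin cur (pvAddOne (pvDpGet dp ((M + 1) ^^^ (1 <<< i)) j))
            else cur) (pvDpGet dp (M + 1) i))) dp) n ∧
      (∀ m i, m < 2 ^ n → i < n → pvDpGet (l.foldl (fun dp i =>
        if ((M + 1) &&& (1 <<< i) == 0) = true then dp
        else
          pvDpSet dp (M + 1) i ((List.range n).foldl (fun cur j =>
            if ((((M + 1) ^^^ (1 <<< i)) &&& (1 <<< j) != 0) && pvEdge graph j i) = true then
              pvMin cur (pvAddOne (pvDpGet dp ((M + 1) ^^^ (1 <<< i)) j))
            else cur) (pvDpGet dp (M + 1) i))) dp) m i =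
        if m = M + 1 ∧ (done i || l.contains i) = true then pvSpecDp graph n (M + 1) m i
        else pvSpecDp graph n M m i) := by
  intro l
  induction l with
  | nil =>
    intro done dp _ _ _ hshape hinv
    refine ⟨hshape, ?_⟩
    intro m i hm hi
    simpa using hinv m i hm hi
  | cons x l IH =>
    intro done dp hbnd hnd hdone hshape hinv
    have hx : x < n := hbnd x (List.mem_cons_self)
    have hdx : done x = false := hdone x (List.mem_cons_self)
    have hxl : x ∉ l := (List.nodup_cons.mp hnd).1
    have hmerge : ∀ i, (done i || (i == x) || l.contains i) = (done i || (x :: l).contains i) := by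
      intro i
      simp only [List.contains_cons, ← Bool.or_assoc]
    simp only [List.foldl_cons]
    by_cases hb : (M + 1).testBit x = true
    · -- the cell (M+1, x) is written with its final value
      have hguard : (((M + 1) &&& (1 <<< x) == 0) = true) = False := by
        rw [pvBitA0, hb]
        simp
      rw [if_neg (by rw [hguard]; exact id)]
      have hprevlt : (M + 1) ^^^ (1 <<< x) < M + 1 := pvXorLt hb
      have hseed : pvDpGet dp (M + 1) x = pvInit (M + 1) x := by
        rw [hinv (M + 1) x hM hx, if_neg (by simp [hdx]), pvSpecDp,
          if_neg (by rintro ⟨h1, _⟩; omega)]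
      have hval : (List.range n).foldl (fun cur j =>
            if ((((M + 1) ^^^ (1 <<< x)) &&& (1 <<< j) != 0) && pvEdge graph j x) = true then
              pvMin cur (pvAddOne (pvDpGet dp ((M + 1) ^^^ (1 <<< x)) j))
            else cur) (pvDpGet dp (M + 1) x)
          = pvSpecDp graph n (M + 1) (M + 1) x := by
        have hcongr : (List.range n).foldl (fun cur j =>
              if ((((M + 1) ^^^ (1 <<< x)) &&& (1 <<< j) != 0) && pvEdge graph j x) = true then
                pvMin cur (pvAddOne (pvDpGet dp ((M + 1) ^^^ (1 <<< x)) j))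
              else cur) (pvDpGet dp (M + 1) x)
            = (List.range n).foldl (fun cur j =>
              if (((M + 1) ^^^ (1 <<< x)).testBit j && pvEdge graph j x) = true then
                pvMin cur (pvAddOne (pvC graph n ((M + 1) ^^^ (1 <<< x)) j))
              else cur) (pvDpGet dp (M + 1) x) := by
          apply PySem.List.foldl_congr_mem
          intro acc j hj
          rw [List.mem_range] at hj
          rw [pvBitA]
          by_cases hg : ((((M + 1) ^^^ (1 <<< x)).testBit j) && pvEdge graph j x) = true
          · rw [if_pos hg, if_pos hg]
            have hbj : (((M + 1) ^^^ (1 <<< x)).testBit j) = true := (Bool.and_eq_true_iff.mp hg).1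
            rw [hinv ((M + 1) ^^^ (1 <<< x)) j (by omega) hj,
              if_neg (by rintro ⟨h1, _⟩; omega), pvSpecDp, if_pos ⟨by omega, hbj⟩]
          · rw [if_neg hg, if_neg hg]
        rw [hcongr, hseed]
        by_cases h1 : M + 1 = 1
        · -- mask 1: the fold is a no-op and the preset dp[1][0] = 0 is the spec value
          have hx0 : x = 0 := Nat.testBit_one_eq_true_iff_self_eq_zero.mp (h1 ▸ hb)
          subst hx0
          have : ∀ j ∈ List.range n, ∀ cur : Option Int,
              (if (((M + 1) ^^^ (1 <<< 0)).testBit j && pvEdge graph j 0) = true then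
                pvMin cur (pvAddOne (pvC graph n ((M + 1) ^^^ (1 <<< 0)) j))
              else cur) = cur := by
            intro j _ cur
            rw [if_neg]
            simp [h1, Nat.zero_testBit]
          rw [PySem.List.foldl_congr_mem' _ _ _ _ this, List.foldl_fixed]
          rw [pvSpecDp, if_pos ⟨le_refl _, hb⟩, pvInit, if_pos ⟨h1, rfl⟩, h1, pvC]
          simp [pvCs]
        · rw [pvInit, if_neg (by rintro ⟨h2, _⟩; exact h1 h2), pvSpecDp,
            if_pos ⟨le_refl _, hb⟩, pvC_eq_fold graph n h1 hb]
      rw [hval]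
      have hshape' := pvShape_set dp n hshape (m := M + 1) (i := x) hM (pvSpecDp graph n (M + 1) (M + 1) x)
      have hinv' : ∀ m i, m < 2 ^ n → i < n →
          pvDpGet (pvDpSet dp (M + 1) x (pvSpecDp graph n (M + 1) (M + 1) x)) m i =
          if m = M + 1 ∧ (done i || (i == x)) = true then pvSpecDp graph n (M + 1) m i
          else pvSpecDp graph n M m i := by
        intro m i hm hi
        rw [pvDpGet_set dp n hshape hM hx _ m i]
        by_cases hc : m = M + 1 ∧ i = x
        · obtain ⟨rfl, rfl⟩ := hc
          simp
        · rw [if_neg hc, hinv m i hm hi]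
          by_cases hc2 : m = M + 1 ∧ done i = true
          · rw [if_pos hc2, if_pos ⟨hc2.1, by simp [hc2.2]⟩]
          · rw [if_neg hc2, if_neg]
            rintro ⟨rfl, hor⟩
            rcases Bool.or_eq_true_iff.mp hor with h | h
            · exact hc2 ⟨rfl, h⟩
            · exact hc ⟨rfl, by simpa using h⟩
      obtain ⟨s2, i2⟩ := IH (fun y => done y || (y == x)) _
        (fun y hy => hbnd y (List.mem_cons_of_mem _ hy))
        (List.nodup_cons.mp hnd).2
        (fun y hy => by
          show (done y || (y == x)) = false
          rw [hdone y (List.mem_cons_of_mem _ hy)]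
          simp
          rintro rfl
          exact hxl hy)
        hshape' hinv'
      refine ⟨s2, ?_⟩
      intro m i hm hi
      rw [i2 m i hm hi, hmerge i]
    · -- bit i not in mask: Python `continue`; both spec rows agree on this cell
      have hguard : ((M + 1) &&& (1 <<< x) == 0) = true := by
        rw [pvBitA0]
        simp at hb ⊢
        exact hb
      rw [if_pos hguard]
      have hinv' : ∀ m i, m < 2 ^ n → i < n → pvDpGet dp m i =
          if m = M + 1 ∧ (done i || (i == x)) = true then pvSpecDp graph n (M + 1) m i
          else pvSpecDp graph n M m i := by
        intro m i hm hi
        rw [hinv m i hm hi]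
        by_cases hc2 : m = M + 1 ∧ done i = true
        · rw [if_pos hc2, if_pos ⟨hc2.1, by simp [hc2.2]⟩]
        · rw [if_neg hc2]
          by_cases hc3 : m = M + 1 ∧ (done i || (i == x)) = true
          · rw [if_pos hc3]
            obtain ⟨rfl, hor⟩ := hc3
            have hix : i = x := by
              rcases Bool.or_eq_true_iff.mp hor with h | h
              · exact absurd ⟨rfl, h⟩ hc2
              · simpa using h
            subst hix
            rw [pvSpecDp, if_neg (by rintro ⟨_, hbb⟩; exact hb hbb), pvSpecDp,
              if_neg (by rintro ⟨_, hbb⟩; exact hb hbb)]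
          · rw [if_neg hc3]
      obtain ⟨s2, i2⟩ := IH (fun y => done y || (y == x)) dp
        (fun y hy => hbnd y (List.mem_cons_of_mem _ hy))
        (List.nodup_cons.mp hnd).2
        (fun y hy => by
          show (done y || (y == x)) = false
          rw [hdone y (List.mem_cons_of_mem _ hy)]
          simp
          rintro rfl
          exact hxl hy)
        hshape hinv'
      refine ⟨s2, ?_⟩
      intro m i hm hi
      rw [i2 m i hm hi, hmerge i]


-- after processing masks 1..K (in order) every row ≤ K holds its final value
theorem pvOuter (graph : List (List Int)) (n : Nat) (hn : 1 ≤ n) :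
    ∀ K, K ≤ 2 ^ n - 1 →
      pvShape ((List.range' 1 K).foldl (fun dp mask =>
        (List.range n).foldl (fun dp i =>
          if (mask &&& (1 <<< i) == 0) = true then dp
          else
            pvDpSet dp mask i ((List.range n).foldl (fun cur j =>
              if (((mask ^^^ (1 <<< i)) &&& (1 <<< j) != 0) && pvEdge graph j i) = true then
                pvMin cur (pvAddOne (pvDpGet dp (mask ^^^ (1 <<< i)) j))
              else cur) (pvDpGet dp mask i))) dp)
        (pvDpSet (List.replicate (2 ^ n) (List.replicate n (none : Option Int))) 1 0 (some 0))) n ∧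
      (∀ m i, m < 2 ^ n → i < n →
        pvDpGet ((List.range' 1 K).foldl (fun dp mask =>
          (List.range n).foldl (fun dp i =>
            if (mask &&& (1 <<< i) == 0) = true then dp
            else
              pvDpSet dp mask i ((List.range n).foldl (fun cur j =>
                if (((mask ^^^ (1 <<< i)) &&& (1 <<< j) != 0) && pvEdge graph j i) = true then
                  pvMin cur (pvAddOne (pvDpGet dp (mask ^^^ (1 <<< i)) j))
                else cur) (pvDpGet dp mask i))) dp)
          (pvDpSet (List.replicate (2 ^ n) (List.replicate n (none : Option Int))) 1 0 (some 0))) m i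
          = pvSpecDp graph n K m i) := by
  have h2 : 1 < 2 ^ n := by
    calc 1 < 2 ^ 1 := by norm_num
    _ ≤ 2 ^ n := Nat.pow_le_pow_right (by norm_num) hn
  intro K
  induction K with
  | zero =>
    intro _
    simp only [List.range', List.foldl_nil]
    exact ⟨pvShape_dp1 n hn, fun m i hm hi => pvDpGet_dp1 graph n hn m i hm hi⟩
  | succ K IH =>
    intro hK
    obtain ⟨sK, iK⟩ := IH (by omega)
    rw [List.range'_1_concat, List.foldl_append]
    simp only [List.foldl_cons, List.foldl_nil, Nat.add_comm 1 K]
    obtain ⟨s2, i2⟩ := pvInner graph n K (by omega) (List.range n) (fun _ => false) _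
      (fun x hx => List.mem_range.mp hx) List.nodup_range (fun _ _ => rfl) sK
      (fun m i hm hi => by
        rw [iK m i hm hi, if_neg (by rintro ⟨_, hf⟩; exact Bool.false_ne_true hf)])
    refine ⟨s2, ?_⟩
    intro m i hm hi
    rw [i2 m i hm hi]
    have hcont : ((false || (List.range n).contains i) : Bool) = true := by simp [hi]
    by_cases hmK : m = K + 1
    · rw [if_pos ⟨hmK, hcont⟩, hmK]
    · rw [if_neg (by rintro ⟨h, _⟩; exact hmK h)]
      unfold pvSpecDp
      by_cases htb : m.testBit i = true
      · by_cases hle : m ≤ K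
        · rw [if_pos ⟨hle, htb⟩, if_pos ⟨by omega, htb⟩]
        · rw [if_neg (by rintro ⟨h, _⟩; omega), if_neg (by rintro ⟨h, _⟩; omega)]
      · rw [if_neg (by rintro ⟨_, h⟩; exact htb h), if_neg (by rintro ⟨_, h⟩; exact htb h)]

-- B's final loop, with the memo threaded through, computes the same spec fold
theorem pvAlt_fold (graph : List (List Int)) (n : Nat) :
    ∀ (l : List Nat), (∀ i ∈ l, i < n) → ∀ (b : Option Int) memo, pvInv graph n memo →
      (l.foldl (fun (acc : Option Int × PySem.Dict Nat (Option Int)) i =>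
          if pvEdge graph i 0 = true then
            (pvMin acc.1 (pvAddOne (pvCost graph n (2 ^ n) acc.2 (2 ^ n - 1) i).1),
              (pvCost graph n (2 ^ n) acc.2 (2 ^ n - 1) i).2)
          else acc) (b, memo)).1
        = l.foldl (fun mc i =>
            if pvEdge graph i 0 = true then pvMin mc (pvAddOne (pvC graph n (2 ^ n - 1) i)) else mc) b := by
  intro l
  induction l with
  | nil => intro _ b memo _; rfl
  | cons x l IH =>
    intro hbnd b memo hinv
    have hx : x < n := hbnd x (List.mem_cons_self)
    have hbit : (2 ^ n - 1).testBit x = true := by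
      rw [Nat.testBit_two_pow_sub_one]
      simp [hx]
    have hfuel : 2 ^ n - 1 ≤ 2 ^ n := Nat.sub_le _ _
    simp only [List.foldl_cons]
    by_cases he : pvEdge graph x 0 = true
    · rw [if_pos he, if_pos he]
      obtain ⟨h1, h2⟩ := pvCost_ok graph n (2 ^ n - 1) (2 ^ n) memo x hx hfuel hbit hinv
      rw [h1]
      exact IH (fun y hy => hbnd y (List.mem_cons_of_mem _ hy)) _ _ h2
    · rw [if_neg he, if_neg he]
      exact IH (fun y hy => hbnd y (List.mem_cons_of_mem _ hy)) b memo hinv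

-- ===== VERDICT (by name: the statement is the Claim_ definition above) =====
theorem hamiltonian_cycle_dynamic_spec : Claim_equal_hamiltonian_cycle_dynamic := by
  intro graph _ hpre
  unfold Spec_hamiltonian_cycle_dynamic
  obtain ⟨hne, _⟩ := hpre
  have hn : 1 ≤ graph.length := List.length_pos_iff.mpr hne
  have hlt : 2 ^ graph.length - 1 < 2 ^ graph.length := by
    have : 1 ≤ 2 ^ graph.length := Nat.one_le_two_pow
    omega
  have hA : hamiltonian_cycle_dynamic graph
      = (List.range' 1 (graph.length - 1)).foldl (fun mc i =>
          if pvEdge graph i 0 = true then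
            pvMin mc (pvAddOne (pvC graph graph.length (2 ^ graph.length - 1) i))
          else mc) none := by
    obtain ⟨_, iF⟩ := pvOuter graph graph.length hn (2 ^ graph.length - 1) le_rfl
    simp only [hamiltonian_cycle_dynamic]
    apply PySem.List.foldl_congr_mem'
    intro i hi acc
    obtain ⟨hi1, hi2⟩ := List.mem_range'_1.mp hi
    have hiN : i < graph.length := by omega
    by_cases he : pvEdge graph i 0 = true
    · rw [if_pos he, if_pos he, iF (2 ^ graph.length - 1) i hlt hiN, pvSpecDp,
        if_pos ⟨le_rfl, by rw [Nat.testBit_two_pow_sub_one]; simp [hiN]⟩]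
    · rw [if_neg he, if_neg he]
  have hB : hamiltonian_cycle_dynamic_alt graph
      = (List.range' 1 (graph.length - 1)).foldl (fun mc i =>
          if pvEdge graph i 0 = true then
            pvMin mc (pvAddOne (pvC graph graph.length (2 ^ graph.length - 1) i))
          else mc) none := by
    simp only [hamiltonian_cycle_dynamic_alt]
    apply pvAlt_fold graph graph.length (List.range' 1 (graph.length - 1))
      (fun i hi => by
        obtain ⟨_, h2⟩ := List.mem_range'_1.mp hi
        omega)
      none PySem.Dict.empty
    intro mask i v _ hv
    simp [PySem.Dict.get?, PySem.Dict.empty] at hv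
  rw [hA, hB]
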